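-- pv_equiv track=rewrite | github.com/furyash/nscLab | 1.char Stuffing/sender.py | charstuff
-- ===== SOURCE A (Python) =====
-- def charstuff(message):
--     # Using Dilimiter : 'D'
--     # Escape Character: 'X'
--     data = list(message)
--     i=0
--
--
--     while (i<len(data)):
--         if data[i]=='D' or data[i]=='X':
--             data.insert(i,'X')
--             i+=1
--         i+=1
--
--     new = ''.join(data)
--     new = 'D' + new + 'D'
--     return new
-- ===== SOURCE B (Python) =====
-- def charstuff(message):
--     body = ''.join(message)
--     return 'D' + body.replace('X', 'XX').replace('D', 'XD') + 'D'
-- ===== Notes on version B (the rewrite author's own statement) =====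
-- stated objective: faster
-- what changed: Replaces A's index-juggling while loop with in-place list.insert (each insert shifts the tail) by two chained string replacements ('X'->'XX' first, then 'D'->'XD') wrapped in 'D's.
import Mathlib
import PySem

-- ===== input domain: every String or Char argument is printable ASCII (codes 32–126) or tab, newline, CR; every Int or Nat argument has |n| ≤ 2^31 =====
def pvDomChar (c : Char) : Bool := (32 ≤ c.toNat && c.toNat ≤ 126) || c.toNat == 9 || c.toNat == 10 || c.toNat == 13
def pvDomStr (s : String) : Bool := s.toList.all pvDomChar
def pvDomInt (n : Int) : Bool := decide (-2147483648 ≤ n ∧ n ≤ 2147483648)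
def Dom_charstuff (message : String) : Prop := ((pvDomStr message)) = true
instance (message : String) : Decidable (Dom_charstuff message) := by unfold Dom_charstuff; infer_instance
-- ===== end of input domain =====

-- B is the idiomatic rewrite: two chained replaces instead of A's while loop with in-place inserts.

-- ===== PORT A =====
-- A's while loop: state (data, i); on 'D'/'X' insert 'X' at i and advance by 2, else by 1.
def charstuffLoop (data : List Char) (i : Nat) : List Char :=
  if h : i < data.length then
    if data[i] = 'D' ∨ data[i] = 'X' then
      charstuffLoop (data.insertIdx i 'X') (i + 2)
    else
      charstuffLoop data (i + 1)
  else data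
termination_by data.length - i
decreasing_by
  · rw [List.length_insertIdx, if_pos (Nat.le_of_lt h)]; omega
  · omega

def charstuff (message : String) : String :=
  "D" ++ String.ofList (charstuffLoop message.toList 0) ++ "D"

-- ===== PORT B =====
-- ''.join(message) on a str is the string itself; then two chained replaces.
def charstuff_alt (message : String) : String :=
  "D" ++ PySem.Str.replace (PySem.Str.replace message "X" "XX") "D" "XD" ++ "D"

-- ===== PRECONDITION & SPEC =====
def Spec_charstuff (message : String) (out : String) : Prop := out = charstuff_alt message
instance (message : String) (out : String) : Decidable (Spec_charstuff message out) := by unfold Spec_charstuff; infer_instance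

-- ===== CLAIM (what is proved, stated in full; the proofs are below) =====
def Claim_equal_charstuff : Prop := ∀ (message : String), Dom_charstuff message → Spec_charstuff message (charstuff message)

-- ===== LEMMAS AND PROOFS =====

-- the common characterisation: each 'D'/'X' gets an 'X' in front
def pvStuff (s : List Char) : List Char :=
  s.flatMap (fun c => if c = 'D' ∨ c = 'X' then ['X', c] else [c])

theorem insertIdx_length_mid (pre l : List Char) (x : Char) :
    (pre ++ l).insertIdx pre.length x = pre ++ x :: l := by
  induction pre with
  | nil => rfl
  | cons a t ih => simp only [List.cons_append, List.length_cons, List.insertIdx]; exact congrArg (a :: ·) ih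

theorem charstuffLoop_spec (rest pre : List Char) :
    charstuffLoop (pre ++ rest) pre.length = pre ++ pvStuff rest := by
  induction rest generalizing pre with
  | nil =>
    rw [charstuffLoop]
    simp [pvStuff]
  | cons c t ih =>
    rw [charstuffLoop]
    have hlen : pre.length < (pre ++ c :: t).length := by simp
    have hget : (pre ++ c :: t)[pre.length]'hlen = c := by
      simp
    rw [dif_pos hlen]
    by_cases hc : c = 'D' ∨ c = 'X'
    · rw [if_pos (by rw [hget]; exact hc)]
      have hins : (pre ++ c :: t).insertIdx pre.length 'X'
          = (pre ++ ['X', c]) ++ t := by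
        rw [insertIdx_length_mid]
        simp
      have hlen2 : pre.length + 2 = (pre ++ ['X', c]).length := by simp
      rw [hins, hlen2, ih (pre ++ ['X', c])]
      simp [pvStuff, hc]
    · rw [if_neg (by rw [hget]; exact hc)]
      have h1 : pre.length + 1 = (pre ++ [c]).length := by simp
      have h2 : pre ++ c :: t = (pre ++ [c]) ++ t := by simp
      rw [h2, h1, ih (pre ++ [c])]
      simp [pvStuff, hc]

-- single-character replace is a flatMap
theorem replace_go_single (o : Char) (new : List Char) :
    ∀ (fuel : Nat) (s acc : List Char), s.length ≤ fuel →
    PySem.Chars.replace.go [o] new fuel s acc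
      = acc.reverse ++ s.flatMap (fun c => if c = o then new else [c]) := by
  intro fuel
  induction fuel with
  | zero =>
    intro s acc h
    have : s = [] := List.length_eq_zero_iff.mp (Nat.le_zero.mp h)
    subst this
    simp [PySem.Chars.replace.go]
  | succ n ih =>
    intro s acc h
    cases s with
    | nil => simp [PySem.Chars.replace.go]
    | cons c t =>
      rw [PySem.Chars.replace.go]
      by_cases hc : c = o
      · have hp : List.isPrefixOf [o] (c :: t) = true := by
          simp [List.isPrefixOf, hc]
        rw [if_pos hp]
        simp only [List.length_cons] at h
        rw [ih _ _ (by simpa using Nat.le_of_succ_le_succ h)]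
        simp [hc]
      · have hp : List.isPrefixOf [o] (c :: t) = false := by
          simp [List.isPrefixOf]
          exact fun h' => hc h'.symm
        rw [if_neg (by simp [hp])]
        simp only [List.length_cons] at h
        rw [ih _ _ (Nat.le_of_succ_le_succ h)]
        simp [hc]

theorem replace_single (o : Char) (new s : List Char) :
    PySem.Chars.replace s [o] new
      = s.flatMap (fun c => if c = o then new else [c]) := by
  rw [PySem.Chars.replace]
  simp only [List.isEmpty_cons, Bool.false_eq_true, if_false]
  rw [replace_go_single o new s.length s [] le_rfl]
  simp

theorem stuff_eq_replaces (s : List Char) :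
    PySem.Chars.replace (PySem.Chars.replace s ['X'] ['X', 'X']) ['D'] ['X', 'D']
      = pvStuff s := by
  rw [replace_single, replace_single, pvStuff]
  induction s with
  | nil => rfl
  | cons c t ih =>
    simp only [List.flatMap_cons, List.flatMap_append, ih]
    by_cases hX : c = 'X'
    · subst hX; simp
    · by_cases hD : c = 'D' <;> simp [hX, hD]

-- ===== VERDICT (by name: the statement is the Claim_ definition above) =====
theorem charstuff_spec : Claim_equal_charstuff := by
  intro message _
  unfold Spec_charstuff charstuff charstuff_alt
  have h0 : charstuffLoop message.toList 0 = pvStuff message.toList := by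
    have := charstuffLoop_spec message.toList []
    simpa using this
  rw [h0]
  have : (PySem.Str.replace (PySem.Str.replace message "X" "XX") "D" "XD")
      = String.ofList (pvStuff message.toList) := by
    simp only [PySem.Str.replace]
    rw [← stuff_eq_replaces message.toList]
    simp
  rw [this]
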